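-- pv_equiv track=rewrite | github.com/tim-jonker/advent_of_code | src/aoc2025/day10/assignment1.py | find_buttons_pressed
-- ===== SOURCE A (Python) =====
-- from copy import deepcopy
--
-- def find_buttons_pressed(buttons, desired_pattern):
--     current_sequences = {tuple([False] * len(desired_pattern)): 0}
--     while True:
--         new_sequences = {}
--         for current_sequence, buttons_pressed in current_sequences.items():
--             for button in buttons:
--                 new_sequence = list(deepcopy(current_sequence))
--                 for pos in button:
--                     new_sequence[pos] = not new_sequence[pos]
--                 new_sequence = tuple(new_sequence)
--                 if new_sequence not in current_sequences:
--                     new_sequences[tuple(new_sequence)] = buttons_pressed + 1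
--                 if new_sequence == desired_pattern:
--                     return buttons_pressed + 1
--         current_sequences = new_sequences
-- ===== SOURCE B (Python) =====
-- def find_buttons_pressed(buttons, desired_pattern):
--     # BFS with a global visited set and explicit frontier/depth; returns -1 on
--     # unreachable targets where the original scans levels forever.
--     target = tuple(desired_pattern)
--     start = (False,) * len(desired_pattern)
--     visited = {start}
--     frontier = [start]
--     depth = 0
--     while frontier:
--         depth += 1
--         next_frontier = []
--         for state in frontier:
--             for button in buttons:
--                 s = list(state)
--                 for pos in button:
--                     s[pos] = not s[pos]
--                 s = tuple(s)
--                 if s == target: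
--                     return depth
--                 if s not in visited:
--                     visited.add(s)
--                     next_frontier.append(s)
--         frontier = next_frontier
--     return -1
-- ===== Notes on version B (the rewrite author's own statement) =====
-- stated objective: alternative
-- what changed: Replaces A's level-by-level dict rebuilding (which records per-state press counts and prunes only against the previous level, so old states are re-expanded forever) with a classic BFS using a single global visited set, an explicit frontier list and a depth counter; B also terminates with -1 when the frontier empties (unreachable targets), where A loops forever.
import Mathlib
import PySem

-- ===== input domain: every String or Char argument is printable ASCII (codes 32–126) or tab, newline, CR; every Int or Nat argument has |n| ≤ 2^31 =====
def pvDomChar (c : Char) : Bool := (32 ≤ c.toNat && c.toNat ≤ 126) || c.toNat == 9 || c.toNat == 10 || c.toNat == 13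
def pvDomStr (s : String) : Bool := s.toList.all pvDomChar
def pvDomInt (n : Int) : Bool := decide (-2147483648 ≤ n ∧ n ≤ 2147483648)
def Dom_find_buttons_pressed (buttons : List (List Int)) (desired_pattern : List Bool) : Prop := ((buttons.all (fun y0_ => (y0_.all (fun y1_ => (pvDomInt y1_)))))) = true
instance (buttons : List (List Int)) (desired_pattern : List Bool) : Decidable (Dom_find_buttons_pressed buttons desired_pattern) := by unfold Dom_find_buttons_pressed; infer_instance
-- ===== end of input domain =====

-- B replaces A's level-by-level dict rebuild (pruned only against the previous level) by a
-- classic BFS with a global visited set and explicit frontier/depth; same return value wherever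
-- A returns (B additionally terminates with -1 on unreachable targets, where A loops forever —
-- such inputs are outside Pre_).


-- ===== PORT A =====

-- `seq[pos] = not seq[pos]` with Python's negative-index wrap; exact for -len ≤ pos < len
-- (out of range Python raises IndexError — excluded by Pre_; the guard then returns seq unchanged).
def pyFlip (s : List Bool) (p : Int) : List Bool :=
  if 0 ≤ (if p < 0 then p + (s.length : Int) else p) ∧
      (if p < 0 then p + (s.length : Int) else p) < (s.length : Int) then
    s.set (if p < 0 then p + (s.length : Int) else p).toNat
      (! s.getD (if p < 0 then p + (s.length : Int) else p).toNat false)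
  else s

-- `for pos in button: new_sequence[pos] = not new_sequence[pos]`
def pyToggle (s : List Bool) (b : List Int) : List Bool := b.foldl pyFlip s

-- inner `for button in buttons:` loop of A (early `return buttons_pressed + 1` = .inl)
def goButtonsA (cur : PySem.Dict (List Bool) Int) (desired : List Bool) (cs : List Bool) (k : Int) :
    List (List Int) → PySem.Dict (List Bool) Int → Sum Int (PySem.Dict (List Bool) Int)
  | [], acc => .inr acc
  | b :: bs, acc =>
      let ns := pyToggle cs b
      let acc' := if cur.contains ns then acc else acc.insert ns (k + 1)
      if ns = desired then .inl (k + 1) else goButtonsA cur desired cs k bs acc'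

-- `for current_sequence, buttons_pressed in current_sequences.items():`
def goItemsA (buttons : List (List Int)) (cur : PySem.Dict (List Bool) Int) (desired : List Bool) :
    List (List Bool × Int) → PySem.Dict (List Bool) Int → Sum Int (PySem.Dict (List Bool) Int)
  | [], acc => .inr acc
  | (cs, k) :: rest, acc =>
      match goButtonsA cur desired cs k buttons acc with
      | .inl a => .inl a
      | .inr acc' => goItemsA buttons cur desired rest acc'

-- `while True:` — fuel is a totality guard only; inside Pre_ the answer is found within
-- buttons.length + 2 rounds (proved below), so the 0-fuel default is never reached there.
def loopA (buttons : List (List Int)) (desired : List Bool) :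
    Nat → PySem.Dict (List Bool) Int → Int
  | 0, _ => 0
  | fuel + 1, cur =>
      match goItemsA buttons cur desired cur.items PySem.Dict.empty with
      | .inl a => a
      | .inr nw => loopA buttons desired fuel nw

def find_buttons_pressed (buttons : List (List Int)) (desired_pattern : List Bool) : Int :=
  -- current_sequences = {tuple([False] * len(desired_pattern)): 0}
  loopA buttons desired_pattern (buttons.length + 2)
    (PySem.Dict.empty.insert (List.replicate desired_pattern.length false) 0)

-- ===== PORT B =====

-- inner `for button in buttons:` loop of B (early `return depth` = .inl)
def goButtonsB (target : List Bool) (st : List Bool) (d : Int) :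
    List (List Int) → List (List Bool) → PySem.Set (List Bool) →
    Sum Int (List (List Bool) × PySem.Set (List Bool))
  | [], nf, vis => .inr (nf, vis)
  | b :: bs, nf, vis =>
      let s := pyToggle st b
      if s = target then .inl d
      else if vis.contains s then goButtonsB target st d bs nf vis
      else goButtonsB target st d bs (nf ++ [s]) (PySem.Set.add vis s)

-- `for state in frontier:`
def goFrontierB (buttons : List (List Int)) (target : List Bool) (d : Int) :
    List (List Bool) → List (List Bool) → PySem.Set (List Bool) →
    Sum Int (List (List Bool) × PySem.Set (List Bool))
  | [], nf, vis => .inr (nf, vis)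
  | st :: rest, nf, vis =>
      match goButtonsB target st d buttons nf vis with
      | .inl a => .inl a
      | .inr (nf', vis') => goFrontierB buttons target d rest nf' vis'

-- `while frontier:` — fuel is a totality guard only (same bound as A's port).
def loopB (buttons : List (List Int)) (target : List Bool) :
    Nat → List (List Bool) → PySem.Set (List Bool) → Int → Int
  | 0, _, _, _ => 0
  | fuel + 1, frontier, vis, depth =>
      if frontier = [] then -1
      else
        match goFrontierB buttons target (depth + 1) frontier [] vis with
        | .inl a => a
        | .inr (nf, vis') => loopB buttons target fuel nf vis' (depth + 1)

def find_buttons_pressed_alt (buttons : List (List Int)) (desired_pattern : List Bool) : Int :=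
  let start := List.replicate desired_pattern.length false
  loopB buttons desired_pattern (buttons.length + 2) [start] (PySem.Set.ofList [start]) 0

-- ===== PRECONDITION & SPEC =====

-- GF(2) span of the buttons (each used at most once), starting from the all-false state.
def spanA (buttons : List (List Int)) (n : Nat) : List (List Bool) :=
  buttons.foldl (fun acc b => PySem.List.dedup (acc ++ acc.map (fun s => pyToggle s b)))
    [List.replicate n false]

-- Pre_ is exactly where Python A returns: either every button position is in range, there is at
-- least one button, and the target is in the GF(2) span of the buttons (otherwise A loops
-- forever); or A returns 1 in its very first scan at some button j whose prefix is in range,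
-- before ever touching an out-of-range position (otherwise A raises IndexError).
def Pre_find_buttons_pressed (buttons : List (List Int)) (desired_pattern : List Bool) : Prop :=
  let n := desired_pattern.length
  ((∀ b ∈ buttons, ∀ p ∈ b, -(n : Int) ≤ p ∧ p < (n : Int)) ∧ buttons ≠ [] ∧
      desired_pattern ∈ spanA buttons n) ∨
  (∃ j ∈ List.range buttons.length,
      (∀ b ∈ buttons.take (j + 1), ∀ p ∈ b, -(n : Int) ≤ p ∧ p < (n : Int)) ∧
      pyToggle (List.replicate n false) (buttons.getD j []) = desired_pattern)

instance (buttons : List (List Int)) (desired_pattern : List Bool) :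
    Decidable (Pre_find_buttons_pressed buttons desired_pattern) := by
  unfold Pre_find_buttons_pressed; infer_instance

def pvWitness_find_buttons_pressed : List (List Int) × List Bool := ([[0], [0, 1]], [true, true])

def Spec_find_buttons_pressed (buttons : List (List Int)) (desired_pattern : List Bool) (out : Int) : Prop := out = find_buttons_pressed_alt buttons desired_pattern
instance (buttons : List (List Int)) (desired_pattern : List Bool) (out : Int) : Decidable (Spec_find_buttons_pressed buttons desired_pattern out) := by unfold Spec_find_buttons_pressed; infer_instance

-- ===== CLAIM (what is proved, stated in full; the proofs are below) =====
def Claim_equal_find_buttons_pressed : Prop := ∀ (buttons : List (List Int)) (desired_pattern : List Bool), Dom_find_buttons_pressed buttons desired_pattern → Pre_find_buttons_pressed buttons desired_pattern → Spec_find_buttons_pressed buttons desired_pattern (find_buttons_pressed buttons desired_pattern)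

-- ===== LEMMAS AND PROOFS =====


-- ---------- basic facts about pyFlip / pyToggle ----------

theorem length_pyFlip (s : List Bool) (p : Int) : (pyFlip s p).length = s.length := by
  unfold pyFlip
  split <;> split <;> simp

theorem pyFlip_in (s : List Bool) (p : Int) (k : Nat) (hk : k < s.length)
    (h : (if p < 0 then p + (s.length : Int) else p) = (k : Int)) :
    pyFlip s p = s.set k (! (s[k]'hk)) := by
  unfold pyFlip
  rw [h, if_pos ⟨by omega, by omega⟩, Int.toNat_natCast,
    List.getD_eq_getElem _ _ hk]

theorem pyFlip_out (s : List Bool) (p : Int)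
    (h : ¬ (0 ≤ (if p < 0 then p + (s.length : Int) else p) ∧
        (if p < 0 then p + (s.length : Int) else p) < (s.length : Int))) :
    pyFlip s p = s := by
  unfold pyFlip
  rw [if_neg h]

theorem set_getD_self_getElem (s : List Bool) (k : Nat) (hk : k < s.length) :
    s.set k (s[k]'hk) = s := by
  apply List.ext_getElem (by simp)
  intro i h1 h2
  by_cases hik : i = k
  · subst hik
    rw [List.getElem_set_self]
  · rw [List.getElem_set_ne (by omega)]

theorem pyFlip_pyFlip (s : List Bool) (p : Int) : pyFlip (pyFlip s p) p = s := by
  by_cases hp : 0 ≤ (if p < 0 then p + (s.length : Int) else p) ∧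
      (if p < 0 then p + (s.length : Int) else p) < (s.length : Int)
  · set i : Int := if p < 0 then p + (s.length : Int) else p with hi
    have hnorm : (if p < 0 then p + (s.length : Int) else p) = ((i.toNat : Nat) : Int) := by
      rw [← hi]; omega
    have hk : i.toNat < s.length := by omega
    rw [pyFlip_in s p i.toNat hk hnorm]
    rw [pyFlip_in _ p i.toNat (by simp only [List.length_set]; exact hk)
      (by simp only [List.length_set]; exact hnorm)]
    rw [List.getElem_set_self, List.set_set, Bool.not_not]
    exact set_getD_self_getElem s i.toNat hk
  · have hp2 : ¬ (0 ≤ (if p < 0 then p + ((pyFlip s p).length : Int) else p) ∧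
        (if p < 0 then p + ((pyFlip s p).length : Int) else p) < ((pyFlip s p).length : Int)) := by
      rw [length_pyFlip]; exact hp
    rw [pyFlip_out (pyFlip s p) p hp2, pyFlip_out s p hp]

theorem flip_comm (s : List Bool) (p q : Int) :
    pyFlip (pyFlip s p) q = pyFlip (pyFlip s q) p := by
  by_cases hp : 0 ≤ (if p < 0 then p + (s.length : Int) else p) ∧
      (if p < 0 then p + (s.length : Int) else p) < (s.length : Int)
  · by_cases hq : 0 ≤ (if q < 0 then q + (s.length : Int) else q) ∧
        (if q < 0 then q + (s.length : Int) else q) < (s.length : Int)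
    · set i : Int := if p < 0 then p + (s.length : Int) else p with hi
      set j : Int := if q < 0 then q + (s.length : Int) else q with hj
      have hik : i.toNat < s.length := by omega
      have hjk : j.toNat < s.length := by omega
      have hni : (if p < 0 then p + (s.length : Int) else p) = ((i.toNat : Nat) : Int) := by
        rw [← hi]; omega
      have hnj : (if q < 0 then q + (s.length : Int) else q) = ((j.toNat : Nat) : Int) := by
        rw [← hj]; omega
      by_cases hij : i.toNat = j.toNat
      · rw [pyFlip_in s p i.toNat hik hni, pyFlip_in s q i.toNat hik (by rw [hnj, hij]),
          pyFlip_in _ q i.toNat (by simp only [List.length_set]; exact hik)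
            (by simp only [List.length_set]; rw [hnj, hij]),
          pyFlip_in _ p i.toNat (by simp only [List.length_set]; exact hik)
            (by simp only [List.length_set]; exact hni)]
      · rw [pyFlip_in s p i.toNat hik hni, pyFlip_in s q j.toNat hjk hnj,
          pyFlip_in _ q j.toNat (by simp only [List.length_set]; exact hjk)
            (by simp only [List.length_set]; exact hnj),
          pyFlip_in _ p i.toNat (by simp only [List.length_set]; exact hik)
            (by simp only [List.length_set]; exact hni),
          List.getElem_set_ne (by omega), List.getElem_set_ne (by omega)]
        exact List.set_comm _ _ (by omega)
    · have hq2 : ¬ (0 ≤ (if q < 0 then q + ((pyFlip s p).length : Int) else q) ∧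
          (if q < 0 then q + ((pyFlip s p).length : Int) else q) < ((pyFlip s p).length : Int)) := by
        rw [length_pyFlip]; exact hq
      rw [pyFlip_out (pyFlip s p) q hq2, pyFlip_out s q hq]
  · by_cases hq : 0 ≤ (if q < 0 then q + (s.length : Int) else q) ∧
        (if q < 0 then q + (s.length : Int) else q) < (s.length : Int)
    · have hp2 : ¬ (0 ≤ (if p < 0 then p + ((pyFlip s q).length : Int) else p) ∧
          (if p < 0 then p + ((pyFlip s q).length : Int) else p) < ((pyFlip s q).length : Int)) := by
        rw [length_pyFlip]; exact hp
      rw [pyFlip_out s p hp, pyFlip_out (pyFlip s q) p hp2]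
    · have hq2 : ¬ (0 ≤ (if q < 0 then q + ((pyFlip s p).length : Int) else q) ∧
          (if q < 0 then q + ((pyFlip s p).length : Int) else q) < ((pyFlip s p).length : Int)) := by
        rw [length_pyFlip]; exact hq
      have hp2 : ¬ (0 ≤ (if p < 0 then p + ((pyFlip s q).length : Int) else p) ∧
          (if p < 0 then p + ((pyFlip s q).length : Int) else p) < ((pyFlip s q).length : Int)) := by
        rw [length_pyFlip]; exact hp
      rw [pyFlip_out s p hp, pyFlip_out s q hq]
      exact (pyFlip_out s p hp).symm

theorem flip_toggle_comm (b : List Int) (s : List Bool) (p : Int) :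
    pyToggle (pyFlip s p) b = pyFlip (pyToggle s b) p := by
  induction b generalizing s with
  | nil => rfl
  | cons q rest ih =>
      show pyToggle (pyFlip (pyFlip s p) q) rest = pyFlip (pyToggle (pyFlip s q) rest) p
      rw [flip_comm, ih]

theorem toggle_toggle (b : List Int) (s : List Bool) :
    pyToggle (pyToggle s b) b = s := by
  induction b generalizing s with
  | nil => rfl
  | cons p rest ih =>
      show pyToggle (pyFlip (pyToggle (pyFlip s p) rest) p) rest = s
      rw [← flip_toggle_comm, pyFlip_pyFlip, ih]

-- ---------- walks ----------

inductive ReachesN (bt : List (List Int)) (z : List Bool) : Nat → List Bool → Prop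
  | zero : ReachesN bt z 0 z
  | step {d : Nat} {s : List Bool} {b : List Int} :
      ReachesN bt z d s → b ∈ bt → ReachesN bt z (d + 1) (pyToggle s b)

theorem reach_zero_eq {bt z s} (h : ReachesN bt z 0 s) : s = z := by
  cases h; rfl

theorem reach_succ_elim {bt z d s} (h : ReachesN bt z (d + 1) s) :
    ∃ p b, ReachesN bt z d p ∧ b ∈ bt ∧ s = pyToggle p b := by
  cases h with
  | step hp hb => exact ⟨_, _, hp, hb, rfl⟩

def MinR (bt : List (List Int)) (z : List Bool) (d : Nat) (s : List Bool) : Prop :=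
  ReachesN bt z d s ∧ ∀ i, i < d → ¬ ReachesN bt z i s

theorem exists_minR {bt z d s} (h : ReachesN bt z d s) :
    ∃ j, j ≤ d ∧ MinR bt z j s := by
  induction d using Nat.strong_induction_on with
  | _ d ih =>
      by_cases hex : ∃ i, i < d ∧ ReachesN bt z i s
      · obtain ⟨i, hlt, hi⟩ := hex
        obtain ⟨j, hj, hm⟩ := ih i hlt hi
        exact ⟨j, le_trans hj (le_of_lt hlt), hm⟩
      · exact ⟨d, le_refl d, h, fun i hlt hri => hex ⟨i, hlt, hri⟩⟩

theorem minR_succ_elim {bt z d s} (h : MinR bt z (d + 1) s) :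
    ∃ p b, MinR bt z d p ∧ b ∈ bt ∧ s = pyToggle p b := by
  obtain ⟨p, b, hp, hb, hs⟩ := reach_succ_elim h.1
  obtain ⟨j, hj, hm⟩ := exists_minR hp
  rcases Nat.lt_or_ge j d with hlt | hge
  · exact absurd (hs ▸ ReachesN.step hm.1 hb) (h.2 (j + 1) (by omega))
  · have : j = d := le_antisymm hj hge
    exact ⟨p, b, this ▸ hm, hb, hs⟩

theorem minR_chain {bt z d s} (h : MinR bt z d s) :
    ∀ r, r ≤ d → ∃ p, MinR bt z r p := by
  induction d generalizing s with
  | zero => intro r hr; exact ⟨s, (Nat.le_zero.mp hr) ▸ h⟩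
  | succ d ih =>
      intro r hr
      rcases Nat.lt_or_ge r (d + 1) with hlt | hge
      · obtain ⟨p, _, hm, _, _⟩ := minR_succ_elim h
        exact ih hm r (by omega)
      · exact ⟨s, (le_antisymm hr hge) ▸ h⟩

theorem reach_append {bt z d s} (h : ReachesN bt z d s) (l : List (List Int))
    (hl : ∀ b ∈ l, b ∈ bt) :
    ReachesN bt z (d + l.length) (List.foldl pyToggle s l) := by
  induction l generalizing d s with
  | nil => simpa using h
  | cons b rest ih =>
      have hstep : ReachesN bt z (d + 1) (pyToggle s b) :=
        ReachesN.step h (hl b (by simp))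
      have := ih hstep (fun b hb => hl b (by simp [hb]))
      simpa [Nat.add_assoc, Nat.add_comm 1 rest.length] using this

-- a walk of minimal positive length to the target, one step back
theorem min_walk_back {bt z t m} (hm : 0 < m) (hW : ReachesN bt z m t)
    (hmin : ∀ i, 0 < i → i < m → ¬ ReachesN bt z i t) :
    ∃ p b, MinR bt z (m - 1) p ∧ b ∈ bt ∧ t = pyToggle p b := by
  obtain ⟨M, rfl⟩ : ∃ M, m = M + 1 := ⟨m - 1, by omega⟩
  obtain ⟨p, b, hp, hb, ht⟩ := reach_succ_elim hW
  obtain ⟨j, hj, hmj⟩ := exists_minR hp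
  rcases Nat.lt_or_ge j M with hlt | hge
  · exact absurd (ht ▸ ReachesN.step hmj.1 hb) (hmin (j + 1) (by omega) (by omega))
  · have : j = M := le_antisymm hj hge
    exact ⟨p, b, by simpa using this ▸ hmj, hb, ht⟩

-- ---------- span (Pre_) gives a short positive walk ----------

theorem span_mem_elim (bt : List (List Int)) :
    ∀ (bs : List (List Int)) (acc : List (List Bool)) (s : List Bool),
      s ∈ List.foldl (fun acc b => PySem.List.dedup (acc ++ acc.map (fun s => pyToggle s b))) acc bs →
      ∃ s₀ ∈ acc, ∃ l, l.Sublist bs ∧ List.foldl pyToggle s₀ l = s := by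
  intro bs
  induction bs with
  | nil => intro acc s hs; exact ⟨s, by simpa using hs, [], List.Sublist.refl _, rfl⟩
  | cons b rest ih =>
      intro acc s hs
      obtain ⟨s₁, hs₁, l, hl, hfold⟩ := ih _ s hs
      rw [PySem.List.mem_dedup] at hs₁
      rcases List.mem_append.mp hs₁ with h₁ | h₁
      · exact ⟨s₁, h₁, l, hl.cons b, hfold⟩
      · obtain ⟨s₀, hs₀, rfl⟩ := List.mem_map.mp h₁
        exact ⟨s₀, hs₀, b :: l, hl.cons₂ b, hfold⟩

theorem span_reach {bt : List (List Int)} {t : List Bool}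
    (hne : bt ≠ []) (hsp : t ∈ spanA bt t.length) :
    ∃ d, 0 < d ∧ d ≤ bt.length + 2 ∧ ReachesN bt (List.replicate t.length false) d t := by
  obtain ⟨s₀, hs₀, l, hl, hfold⟩ := span_mem_elim bt bt _ t hsp
  have hz : s₀ = List.replicate t.length false := by simpa using hs₀
  subst hz
  cases l with
  | nil =>
      -- empty combination: t is the all-false start; press any button twice
      obtain ⟨b₀, bs, rfl⟩ : ∃ b₀ bs, bt = b₀ :: bs := by
        cases bt with
        | nil => exact absurd rfl hne
        | cons b₀ bs => exact ⟨b₀, bs, rfl⟩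
      have hb₀ : b₀ ∈ b₀ :: bs := by simp
      have h1 : ReachesN (b₀ :: bs) (List.replicate t.length false) 1
          (pyToggle (List.replicate t.length false) b₀) := ReachesN.step ReachesN.zero hb₀
      have h2 := ReachesN.step h1 hb₀
      rw [toggle_toggle] at h2
      have ht : t = List.replicate t.length false := by simpa using hfold.symm
      exact ⟨2, by omega, by omega, ht ▸ h2⟩
  | cons b l' =>
      have hmem : ∀ x ∈ b :: l', x ∈ bt := fun x hx => hl.subset hx
      have := reach_append (ReachesN.zero (bt := bt) (z := List.replicate t.length false))
        (b :: l') hmem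
      rw [hfold] at this
      have hle : (b :: l').length ≤ bt.length := hl.length_le
      exact ⟨(b :: l').length, by simp, by omega, by simpa using this⟩

-- ---------- Dict helpers ----------

theorem mem_items_insert_elim {κ ν : Type} [BEq κ] [LawfulBEq κ]
    (d : PySem.Dict κ ν) (k : κ) (v : ν) (p : κ × ν)
    (hp : p ∈ (d.insert k v).items) : p ∈ d.items ∨ p = (k, v) := by
  rw [PySem.Dict.items_insert] at hp
  by_cases hc : d.contains k
  · rw [if_pos hc] at hp
    obtain ⟨q, hq, hqp⟩ := List.mem_map.mp hp
    by_cases hqk : q.1 == k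
    · right; rw [if_pos hqk] at hqp; exact hqp.symm
    · left; rw [if_neg hqk] at hqp; exact hqp ▸ hq
  · rw [if_neg hc] at hp
    rcases List.mem_append.mp hp with h | h
    · exact Or.inl h
    · exact Or.inr (by simpa using h)

theorem contains_to_items {κ ν : Type} [BEq κ] [LawfulBEq κ]
    (d : PySem.Dict κ ν) (k : κ) (hc : d.contains k = true) :
    ∃ v, (k, v) ∈ d.items := by
  have hk : k ∈ d.keys := (PySem.Dict.contains_iff_mem_keys d k).mp hc
  have : k ∈ d.items.map Prod.fst := by simpa [PySem.Dict.keys] using hk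
  obtain ⟨p, hp, hpk⟩ := List.mem_map.mp this
  exact ⟨p.2, by rwa [show (k, p.2) = p from by rw [← hpk]]⟩

-- ---------- goButtonsA lemmas ----------

theorem GBA_inl {cur t cs k} :
    ∀ {bs acc a}, goButtonsA cur t cs k bs acc = .inl a →
      a = k + 1 ∧ ∃ b ∈ bs, pyToggle cs b = t := by
  intro bs
  induction bs with
  | nil => intro acc a h; exact absurd h (by simp [goButtonsA])
  | cons b bs ih =>
      intro acc a h
      unfold goButtonsA at h
      by_cases hb : pyToggle cs b = t
      · rw [if_pos hb] at h
        exact ⟨by injection h with h'; omega, b, by simp, hb⟩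
      · rw [if_neg hb] at h
        obtain ⟨ha, b', hb', hbt⟩ := ih h
        exact ⟨ha, b', by simp [hb'], hbt⟩

theorem GBA_finds {cur t cs k} :
    ∀ {bs acc}, (∃ b ∈ bs, pyToggle cs b = t) →
      ∃ a, goButtonsA cur t cs k bs acc = .inl a := by
  intro bs
  induction bs with
  | nil => intro acc h; simp at h
  | cons b bs ih =>
      intro acc h
      unfold goButtonsA
      by_cases hb : pyToggle cs b = t
      · exact ⟨k + 1, by rw [if_pos hb]⟩
      · rw [if_neg hb]
        rcases h with ⟨b', hb', hbt⟩
        rcases List.mem_cons.mp hb' with rfl | hmem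
        · exact absurd hbt hb
        · exact ih ⟨b', hmem, hbt⟩

theorem GBA_mono {cur t cs k} :
    ∀ {bs acc acc'}, goButtonsA cur t cs k bs acc = .inr acc' →
      ∀ s, acc.contains s = true → acc'.contains s = true := by
  intro bs
  induction bs with
  | nil => intro acc acc' h s hs; unfold goButtonsA at h; injection h with h'; exact h' ▸ hs
  | cons b bs ih =>
      intro acc acc' h s hs
      unfold goButtonsA at h
      by_cases hb : pyToggle cs b = t
      · rw [if_pos hb] at h; exact absurd h (by simp)
      · rw [if_neg hb] at h
        by_cases hc : cur.contains (pyToggle cs b)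
        · rw [if_pos hc] at h; exact ih h s hs
        · rw [if_neg hc] at h
          refine ih h s ?_
          rw [PySem.Dict.contains_insert]
          simp [hs]

theorem GBA_items {cur t cs k} :
    ∀ {bs acc acc'}, goButtonsA cur t cs k bs acc = .inr acc' →
      ∀ p ∈ acc'.items, p ∈ acc.items ∨ (p.2 = k + 1 ∧ ∃ b ∈ bs, p.1 = pyToggle cs b) := by
  intro bs
  induction bs with
  | nil => intro acc acc' h p hp; unfold goButtonsA at h; injection h with h'; exact Or.inl (h' ▸ hp)
  | cons b bs ih =>
      intro acc acc' h p hp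
      unfold goButtonsA at h
      by_cases hb : pyToggle cs b = t
      · rw [if_pos hb] at h; exact absurd h (by simp)
      · rw [if_neg hb] at h
        by_cases hc : cur.contains (pyToggle cs b)
        · rw [if_pos hc] at h
          rcases ih h p hp with h' | ⟨hv, b', hb', hbt⟩
          · exact Or.inl h'
          · exact Or.inr ⟨hv, b', by simp [hb'], hbt⟩
        · rw [if_neg hc] at h
          rcases ih h p hp with h' | ⟨hv, b', hb', hbt⟩
          · rcases mem_items_insert_elim _ _ _ _ h' with h'' | rfl
            · exact Or.inl h''
            · exact Or.inr ⟨rfl, b, by simp, rfl⟩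
          · exact Or.inr ⟨hv, b', by simp [hb'], hbt⟩

theorem GBA_ins {cur t cs k} :
    ∀ {bs acc acc'}, goButtonsA cur t cs k bs acc = .inr acc' →
      ∀ b ∈ bs, cur.contains (pyToggle cs b) = false →
        acc'.contains (pyToggle cs b) = true := by
  intro bs
  induction bs with
  | nil => intro acc acc' _ b hb; simp at hb
  | cons b bs ih =>
      intro acc acc' h b' hb' hcf
      unfold goButtonsA at h
      by_cases hb : pyToggle cs b = t
      · rw [if_pos hb] at h; exact absurd h (by simp)
      · rw [if_neg hb] at h
        rcases List.mem_cons.mp hb' with rfl | hmem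
        · rw [if_neg (by simp [hcf])] at h
          refine GBA_mono h _ ?_
          simp
        · by_cases hc : cur.contains (pyToggle cs b)
          · rw [if_pos hc] at h; exact ih h b' hmem hcf
          · rw [if_neg hc] at h; exact ih h b' hmem hcf

-- ---------- goItemsA lemmas ----------

theorem GIA_inl {buttons cur t} :
    ∀ {its acc a}, goItemsA buttons cur t its acc = .inl a →
      ∃ cs k, (cs, k) ∈ its ∧ a = k + 1 ∧ ∃ b ∈ buttons, pyToggle cs b = t := by
  intro its
  induction its with
  | nil => intro acc a h; exact absurd h (by simp [goItemsA])
  | cons p rest ih =>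
      intro acc a h
      obtain ⟨cs, k⟩ := p
      unfold goItemsA at h
      cases hgb : goButtonsA cur t cs k buttons acc with
      | inl a' =>
          rw [hgb] at h; injection h with h'; subst h'
          obtain ⟨ha, hb⟩ := GBA_inl hgb
          exact ⟨cs, k, by simp, ha, hb⟩
      | inr acc' =>
          rw [hgb] at h
          obtain ⟨cs', k', hmem, ha, hb⟩ := ih h
          exact ⟨cs', k', by simp [hmem], ha, hb⟩

theorem GIA_finds {buttons cur t} :
    ∀ {its acc cs k}, (cs, k) ∈ its → (∃ b ∈ buttons, pyToggle cs b = t) →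
      ∃ a, goItemsA buttons cur t its acc = .inl a := by
  intro its
  induction its with
  | nil => intro acc cs k h; simp at h
  | cons p rest ih =>
      intro acc cs k hmem hb
      obtain ⟨cs₀, k₀⟩ := p
      unfold goItemsA
      rcases List.mem_cons.mp hmem with heq | hmem'
      · obtain ⟨rfl, rfl⟩ : cs₀ = cs ∧ k₀ = k := by
          constructor <;> injection heq <;> simp_all
        obtain ⟨a, ha⟩ := GBA_finds (acc := acc) hb
        exact ⟨a, by rw [ha]⟩
      · cases hgb : goButtonsA cur t cs₀ k₀ buttons acc with
        | inl a => exact ⟨a, rfl⟩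
        | inr acc' => exact ih hmem' hb

theorem GIA_mono {buttons cur t} :
    ∀ {its acc acc'}, goItemsA buttons cur t its acc = .inr acc' →
      ∀ s, acc.contains s = true → acc'.contains s = true := by
  intro its
  induction its with
  | nil => intro acc acc' h s hs; unfold goItemsA at h; injection h with h'; exact h' ▸ hs
  | cons p rest ih =>
      intro acc acc' h s hs
      obtain ⟨cs, k⟩ := p
      unfold goItemsA at h
      cases hgb : goButtonsA cur t cs k buttons acc with
      | inl a => rw [hgb] at h; exact absurd h (by simp)
      | inr acc₁ =>
          rw [hgb] at h
          exact ih h s (GBA_mono hgb s hs)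

theorem GIA_items {buttons cur t} :
    ∀ {its acc acc'}, goItemsA buttons cur t its acc = .inr acc' →
      ∀ p ∈ acc'.items, p ∈ acc.items ∨
        ∃ cs k, (cs, k) ∈ its ∧ p.2 = k + 1 ∧ ∃ b ∈ buttons, p.1 = pyToggle cs b := by
  intro its
  induction its with
  | nil => intro acc acc' h p hp; unfold goItemsA at h; injection h with h'; exact Or.inl (h' ▸ hp)
  | cons q rest ih =>
      intro acc acc' h p hp
      obtain ⟨cs, k⟩ := q
      unfold goItemsA at h
      cases hgb : goButtonsA cur t cs k buttons acc with
      | inl a => rw [hgb] at h; exact absurd h (by simp)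
      | inr acc₁ =>
          rw [hgb] at h
          rcases ih h p hp with h' | ⟨cs', k', hmem, hv, hb⟩
          · rcases GBA_items hgb p h' with h'' | ⟨hv, b, hb, hbt⟩
            · exact Or.inl h''
            · exact Or.inr ⟨cs, k, by simp, hv, b, hb, hbt⟩
          · exact Or.inr ⟨cs', k', by simp [hmem], hv, hb⟩

theorem GIA_ins {buttons cur t} :
    ∀ {its acc acc'}, goItemsA buttons cur t its acc = .inr acc' →
      ∀ cs k, (cs, k) ∈ its → ∀ b ∈ buttons, cur.contains (pyToggle cs b) = false →
        acc'.contains (pyToggle cs b) = true := by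
  intro its
  induction its with
  | nil => intro acc acc' _ cs k h; simp at h
  | cons q rest ih =>
      intro acc acc' h cs k hmem b hb hcf
      obtain ⟨cs₀, k₀⟩ := q
      unfold goItemsA at h
      cases hgb : goButtonsA cur t cs₀ k₀ buttons acc with
      | inl a => rw [hgb] at h; exact absurd h (by simp)
      | inr acc₁ =>
          rw [hgb] at h
          rcases List.mem_cons.mp hmem with heq | hmem'
          · obtain ⟨rfl, rfl⟩ : cs₀ = cs ∧ k₀ = k := by
              constructor <;> injection heq <;> simp_all
            exact GIA_mono h _ (GBA_ins hgb b hb hcf)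
          · exact ih h cs k hmem' b hb hcf

-- ---------- A loop invariant ----------

def InvA (bt : List (List Int)) (z : List Bool) (cur : PySem.Dict (List Bool) Int)
    (r : Nat) : Prop :=
  (∀ p ∈ cur.items, p.2 = (r : Int) ∧ ReachesN bt z r p.1) ∧
  (∀ s, MinR bt z r s → cur.contains s = true)

theorem loopA_eq (bt : List (List Int)) (t : List Bool) (m : Nat)
    (hm : 0 < m) (hW : ReachesN bt (List.replicate t.length false) m t)
    (hmin : ∀ i, 0 < i → i < m → ¬ ReachesN bt (List.replicate t.length false) i t) :
    ∀ (fuel r : Nat) (cur : PySem.Dict (List Bool) Int),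
      InvA bt (List.replicate t.length false) cur r → r < m → m ≤ r + fuel →
      loopA bt t fuel cur = (m : Int) := by
  set z := List.replicate t.length false with hz
  intro fuel
  induction fuel with
  | zero => intro r cur _ h1 h2; omega
  | succ fuel ih =>
      intro r cur hinv hrm hmf
      unfold loopA
      rcases Nat.lt_or_ge (r + 1) m with hlt | hge
      · -- not found this round
        cases hgi : goItemsA bt cur t cur.items PySem.Dict.empty with
        | inl a =>
            obtain ⟨cs, k, hmem, _, b, hb, hbt⟩ := GIA_inl hgi
            have hreach : ReachesN bt z r cs := (hinv.1 _ hmem).2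
            exact absurd (hbt ▸ ReachesN.step hreach hb) (hmin (r + 1) (by omega) hlt)
        | inr nw =>
            refine ih (r + 1) nw ⟨?_, ?_⟩ hlt (by omega)
            · intro p hp
              rcases GIA_items hgi p hp with h' | ⟨cs, k, hmem, hv, b, hb, hbt⟩
              · have hemp : (PySem.Dict.empty : PySem.Dict (List Bool) Int).items = [] := rfl
                rw [hemp] at h'
                exact absurd h' (List.not_mem_nil)
              · have hk : k = (r : Int) := (hinv.1 _ hmem).1
                have hreach : ReachesN bt z r cs := (hinv.1 _ hmem).2
                refine ⟨by rw [hv, hk]; push_cast; ring, ?_⟩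
                exact hbt ▸ ReachesN.step hreach hb
            · intro s hs
              obtain ⟨p, b, hp, hb, hsb⟩ := minR_succ_elim hs
              have hc : cur.contains p = true := hinv.2 p hp
              obtain ⟨v, hv⟩ := contains_to_items cur p hc
              have hcf : cur.contains s = false := by
                by_contra hcc
                have : cur.contains s = true := by
                  cases h' : cur.contains s
                  · exact absurd h' hcc
                  · rfl
                obtain ⟨v', hv'⟩ := contains_to_items cur s this
                exact hs.2 r (by omega) (hinv.1 _ hv').2
              exact hsb ▸ GIA_ins hgi p v hv b hb (hsb ▸ hcf)
      · -- r + 1 = m: the target is generated this round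
        have hrm1 : r + 1 = m := by omega
        obtain ⟨p, b, hp, hb, ht⟩ := min_walk_back hm hW hmin
        have hpr : MinR bt z r p := by
          have : m - 1 = r := by omega
          exact this ▸ hp
        have hc : cur.contains p = true := hinv.2 p hpr
        obtain ⟨v, hv⟩ := contains_to_items cur p hc
        obtain ⟨a, ha⟩ := GIA_finds (acc := PySem.Dict.empty) hv ⟨b, hb, ht.symm⟩
        rw [ha]
        obtain ⟨cs, k, hmem, hak, _⟩ := GIA_inl ha
        have : k = (r : Int) := (hinv.1 _ hmem).1
        rw [hak, this]
        push_cast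
        omega

theorem portA_eq (bt : List (List Int)) (t : List Bool) (m : Nat)
    (hm : 0 < m) (hW : ReachesN bt (List.replicate t.length false) m t)
    (hmin : ∀ i, 0 < i → i < m → ¬ ReachesN bt (List.replicate t.length false) i t)
    (hfuel : m ≤ bt.length + 2) :
    find_buttons_pressed bt t = (m : Int) := by
  unfold find_buttons_pressed
  refine loopA_eq bt t m hm hW hmin (bt.length + 2) 0 _ ⟨?_, ?_⟩ hm (by omega)
  · intro p hp
    have : p = (List.replicate t.length false, (0 : Int)) := by
      have hit : (PySem.Dict.empty.insert (List.replicate t.length false) (0 : Int)).items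
          = [(List.replicate t.length false, 0)] := rfl
      rw [hit] at hp
      simpa using hp
    rw [this]
    exact ⟨rfl, ReachesN.zero⟩
  · intro s hs
    have : s = List.replicate t.length false := reach_zero_eq hs.1
    rw [this]
    exact PySem.Dict.contains_insert_self _ _ _

-- ---------- goButtonsB lemmas ----------

theorem GBB_inl {t st d} :
    ∀ {bs nf vis a}, goButtonsB t st d bs nf vis = .inl a →
      a = d ∧ ∃ b ∈ bs, pyToggle st b = t := by
  intro bs
  induction bs with
  | nil => intro nf vis a h; exact absurd h (by simp [goButtonsB])
  | cons b bs ih =>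
      intro nf vis a h
      unfold goButtonsB at h
      by_cases hb : pyToggle st b = t
      · rw [if_pos hb] at h
        exact ⟨by injection h with h'; omega, b, by simp, hb⟩
      · rw [if_neg hb] at h
        split at h <;> obtain ⟨ha, b', hb', hbt⟩ := ih h <;>
          exact ⟨ha, b', by simp [hb'], hbt⟩

theorem GBB_finds {t st d} :
    ∀ {bs nf vis}, (∃ b ∈ bs, pyToggle st b = t) →
      ∃ a, goButtonsB t st d bs nf vis = .inl a := by
  intro bs
  induction bs with
  | nil => intro nf vis h; simp at h
  | cons b bs ih =>
      intro nf vis h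
      unfold goButtonsB
      by_cases hb : pyToggle st b = t
      · exact ⟨d, by rw [if_pos hb]⟩
      · rw [if_neg hb]
        rcases h with ⟨b', hb', hbt⟩
        rcases List.mem_cons.mp hb' with rfl | hmem
        · exact absurd hbt hb
        · split <;> exact ih ⟨b', hmem, hbt⟩

theorem GBB_nf_mono {t st d} :
    ∀ {bs nf vis nf' vis'}, goButtonsB t st d bs nf vis = .inr (nf', vis') →
      ∀ s ∈ nf, s ∈ nf' := by
  intro bs
  induction bs with
  | nil =>
      intro nf vis nf' vis' h s hs
      unfold goButtonsB at h; injection h with h'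
      injection h' with h1 h2; exact h1 ▸ hs
  | cons b bs ih =>
      intro nf vis nf' vis' h s hs
      unfold goButtonsB at h
      by_cases hb : pyToggle st b = t
      · rw [if_pos hb] at h; exact absurd h (by simp)
      · rw [if_neg hb] at h
        split at h
        · exact ih h s hs
        · exact ih h s (by simp [hs])

theorem GBB_nf_elim {t st d} :
    ∀ {bs nf vis nf' vis'}, goButtonsB t st d bs nf vis = .inr (nf', vis') →
      ∀ s ∈ nf', s ∈ nf ∨ ∃ b ∈ bs, s = pyToggle st b := by
  intro bs
  induction bs with
  | nil =>
      intro nf vis nf' vis' h s hs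
      unfold goButtonsB at h; injection h with h'
      injection h' with h1 h2; exact Or.inl (h1 ▸ hs)
  | cons b bs ih =>
      intro nf vis nf' vis' h s hs
      unfold goButtonsB at h
      by_cases hb : pyToggle st b = t
      · rw [if_pos hb] at h; exact absurd h (by simp)
      · rw [if_neg hb] at h
        split at h
        · rcases ih h s hs with h' | ⟨b', hb', hbt⟩
          · exact Or.inl h'
          · exact Or.inr ⟨b', by simp [hb'], hbt⟩
        · rcases ih h s hs with h' | ⟨b', hb', hbt⟩
          · rcases List.mem_append.mp h' with h'' | h''
            · exact Or.inl h''
            · exact Or.inr ⟨b, by simp, by simpa using h''⟩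
          · exact Or.inr ⟨b', by simp [hb'], hbt⟩

theorem GBB_vis_elim {t st d} :
    ∀ {bs nf vis nf' vis'}, goButtonsB t st d bs nf vis = .inr (nf', vis') →
      ∀ s ∈ vis', s ∈ vis ∨ s ∈ nf' := by
  intro bs
  induction bs with
  | nil =>
      intro nf vis nf' vis' h s hs
      unfold goButtonsB at h; injection h with h'
      injection h' with h1 h2; exact Or.inl (h2 ▸ hs)
  | cons b bs ih =>
      intro nf vis nf' vis' h s hs
      unfold goButtonsB at h
      by_cases hb : pyToggle st b = t
      · rw [if_pos hb] at h; exact absurd h (by simp)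
      · rw [if_neg hb] at h
        split at h
        · exact ih h s hs
        · rcases ih h s hs with h' | h'
          · rcases (PySem.Set.mem_add _ _ _).mp h' with h'' | h''
            · exact Or.inl h''
            · exact Or.inr (GBB_nf_mono h _ (by simp [h'']))
          · exact Or.inr h'

theorem GBB_ins {t st d} :
    ∀ {bs nf vis nf' vis'}, goButtonsB t st d bs nf vis = .inr (nf', vis') →
      ∀ b ∈ bs, pyToggle st b ∉ vis → pyToggle st b ∈ nf' := by
  intro bs
  induction bs with
  | nil => intro nf vis nf' vis' _ b hb; simp at hb
  | cons b bs ih =>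
      intro nf vis nf' vis' h b' hb' hnv
      unfold goButtonsB at h
      by_cases hb : pyToggle st b = t
      · rw [if_pos hb] at h; exact absurd h (by simp)
      · rw [if_neg hb] at h
        rcases List.mem_cons.mp hb' with rfl | hmem
        · rw [if_neg (by simpa [PySem.Set.contains_iff] using hnv)] at h
          exact GBB_nf_mono h _ (by simp)
        · split at h
          · exact ih h b' hmem hnv
          · by_cases hx : pyToggle st b' = pyToggle st b
            · exact GBB_nf_mono h _ (by simp [hx])
            · refine ih h b' hmem ?_
              intro hmm
              rcases (PySem.Set.mem_add _ _ _).mp hmm with h'' | h''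
              · exact hnv h''
              · exact hx h''

-- ---------- goFrontierB lemmas ----------

theorem GFB_inl {buttons t d} :
    ∀ {fr nf vis a}, goFrontierB buttons t d fr nf vis = .inl a →
      a = d ∧ ∃ st ∈ fr, ∃ b ∈ buttons, pyToggle st b = t := by
  intro fr
  induction fr with
  | nil => intro nf vis a h; exact absurd h (by simp [goFrontierB])
  | cons st rest ih =>
      intro nf vis a h
      unfold goFrontierB at h
      cases hgb : goButtonsB t st d buttons nf vis with
      | inl a' =>
          rw [hgb] at h; injection h with h'; subst h'
          obtain ⟨ha, hb⟩ := GBB_inl hgb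
          exact ⟨ha, st, by simp, hb⟩
      | inr pr =>
          obtain ⟨nf', vis'⟩ := pr
          rw [hgb] at h
          obtain ⟨ha, st', hmem, hb⟩ := ih h
          exact ⟨ha, st', by simp [hmem], hb⟩

theorem GFB_finds {buttons t d} :
    ∀ {fr nf vis st}, st ∈ fr → (∃ b ∈ buttons, pyToggle st b = t) →
      ∃ a, goFrontierB buttons t d fr nf vis = .inl a := by
  intro fr
  induction fr with
  | nil => intro nf vis st h; simp at h
  | cons st₀ rest ih =>
      intro nf vis st hmem hb
      unfold goFrontierB
      rcases List.mem_cons.mp hmem with rfl | hmem'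
      · obtain ⟨a, ha⟩ := GBB_finds (nf := nf) (vis := vis) hb
        exact ⟨a, by rw [ha]⟩
      · cases hgb : goButtonsB t st₀ d buttons nf vis with
        | inl a => exact ⟨a, rfl⟩
        | inr pr => obtain ⟨nf', vis'⟩ := pr; exact ih hmem' hb

theorem GFB_nf_mono {buttons t d} :
    ∀ {fr nf vis nf' vis'}, goFrontierB buttons t d fr nf vis = .inr (nf', vis') →
      ∀ s ∈ nf, s ∈ nf' := by
  intro fr
  induction fr with
  | nil =>
      intro nf vis nf' vis' h s hs
      unfold goFrontierB at h; injection h with h'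
      injection h' with h1 h2; exact h1 ▸ hs
  | cons st rest ih =>
      intro nf vis nf' vis' h s hs
      unfold goFrontierB at h
      cases hgb : goButtonsB t st d buttons nf vis with
      | inl a => rw [hgb] at h; exact absurd h (by simp)
      | inr pr =>
          obtain ⟨nf₁, vis₁⟩ := pr
          rw [hgb] at h
          exact ih h s (GBB_nf_mono hgb s hs)

theorem GFB_nf_elim {buttons t d} :
    ∀ {fr nf vis nf' vis'}, goFrontierB buttons t d fr nf vis = .inr (nf', vis') →
      ∀ s ∈ nf', s ∈ nf ∨ ∃ st ∈ fr, ∃ b ∈ buttons, s = pyToggle st b := by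
  intro fr
  induction fr with
  | nil =>
      intro nf vis nf' vis' h s hs
      unfold goFrontierB at h; injection h with h'
      injection h' with h1 h2; exact Or.inl (h1 ▸ hs)
  | cons st rest ih =>
      intro nf vis nf' vis' h s hs
      unfold goFrontierB at h
      cases hgb : goButtonsB t st d buttons nf vis with
      | inl a => rw [hgb] at h; exact absurd h (by simp)
      | inr pr =>
          obtain ⟨nf₁, vis₁⟩ := pr
          rw [hgb] at h
          rcases ih h s hs with h' | ⟨st', hst', hb⟩
          · rcases GBB_nf_elim hgb s h' with h'' | ⟨b, hb, hbt⟩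
            · exact Or.inl h''
            · exact Or.inr ⟨st, by simp, b, hb, hbt⟩
          · exact Or.inr ⟨st', by simp [hst'], hb⟩

theorem GFB_vis_elim {buttons t d} :
    ∀ {fr nf vis nf' vis'}, goFrontierB buttons t d fr nf vis = .inr (nf', vis') →
      ∀ s ∈ vis', s ∈ vis ∨ s ∈ nf' := by
  intro fr
  induction fr with
  | nil =>
      intro nf vis nf' vis' h s hs
      unfold goFrontierB at h; injection h with h'
      injection h' with h1 h2; exact Or.inl (h2 ▸ hs)
  | cons st rest ih =>
      intro nf vis nf' vis' h s hs
      unfold goFrontierB at h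
      cases hgb : goButtonsB t st d buttons nf vis with
      | inl a => rw [hgb] at h; exact absurd h (by simp)
      | inr pr =>
          obtain ⟨nf₁, vis₁⟩ := pr
          rw [hgb] at h
          rcases ih h s hs with h' | h'
          · rcases GBB_vis_elim hgb s h' with h'' | h''
            · exact Or.inl h''
            · exact Or.inr (GFB_nf_mono h s h'')
          · exact Or.inr h'

theorem GFB_ins {buttons t d} :
    ∀ {fr nf vis nf' vis'}, goFrontierB buttons t d fr nf vis = .inr (nf', vis') →
      ∀ st ∈ fr, ∀ b ∈ buttons, pyToggle st b ∉ vis → pyToggle st b ∈ nf' := by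
  intro fr
  induction fr with
  | nil => intro nf vis nf' vis' _ st h; simp at h
  | cons st₀ rest ih =>
      intro nf vis nf' vis' h st hmem b hb hnv
      unfold goFrontierB at h
      cases hgb : goButtonsB t st₀ d buttons nf vis with
      | inl a => rw [hgb] at h; exact absurd h (by simp)
      | inr pr =>
          obtain ⟨nf₁, vis₁⟩ := pr
          rw [hgb] at h
          rcases List.mem_cons.mp hmem with rfl | hmem'
          · exact GFB_nf_mono h _ (GBB_ins hgb b hb hnv)
          · by_cases hv1 : pyToggle st b ∈ vis₁
            · rcases GBB_vis_elim hgb _ hv1 with h' | h'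
              · exact absurd h' hnv
              · exact GFB_nf_mono h _ h'
            · exact ih h st hmem' b hb hv1

-- ---------- B loop invariant ----------

def InvB (bt : List (List Int)) (z : List Bool) (fr : List (List Bool))
    (vis : PySem.Set (List Bool)) (r : Nat) : Prop :=
  (∀ s ∈ fr, ReachesN bt z r s) ∧
  (∀ s, MinR bt z r s → s ∈ fr) ∧
  (∀ s ∈ vis, ∃ i ≤ r, ReachesN bt z i s)

theorem loopB_eq (bt : List (List Int)) (t : List Bool) (m : Nat)
    (hm : 0 < m) (hW : ReachesN bt (List.replicate t.length false) m t)
    (hmin : ∀ i, 0 < i → i < m → ¬ ReachesN bt (List.replicate t.length false) i t) :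
    ∀ (fuel r : Nat) (fr : List (List Bool)) (vis : PySem.Set (List Bool)),
      InvB bt (List.replicate t.length false) fr vis r → r < m → m ≤ r + fuel →
      loopB bt t fuel fr vis (r : Int) = (m : Int) := by
  set z := List.replicate t.length false with hz
  intro fuel
  induction fuel with
  | zero => intro r fr vis _ h1 h2; omega
  | succ fuel ih =>
      intro r fr vis hinv hrm hmf
      unfold loopB
      -- the frontier is nonempty: it contains a state of minimal index r
      obtain ⟨p₀, b₀, hp₀, hb₀, ht₀⟩ := min_walk_back hm hW hmin
      obtain ⟨q, hq⟩ := minR_chain hp₀ r (by omega)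
      have hfr : fr ≠ [] := List.ne_nil_of_mem (hinv.2.1 q hq)
      rw [if_neg hfr]
      rcases Nat.lt_or_ge (r + 1) m with hlt | hge
      · cases hgf : goFrontierB bt t ((r : Int) + 1) fr [] vis with
        | inl a =>
            obtain ⟨_, st, hst, b, hb, hbt⟩ := GFB_inl hgf
            have hreach : ReachesN bt z r st := hinv.1 st hst
            exact absurd (hbt ▸ ReachesN.step hreach hb) (hmin (r + 1) (by omega) hlt)
        | inr pr =>
            obtain ⟨nf, vis'⟩ := pr
            have hrec := ih (r + 1) nf vis' ⟨?_, ?_, ?_⟩ hlt (by omega)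
            · rw [show ((r + 1 : Nat) : Int) = ((r : Int) + 1) by push_cast; ring] at hrec
              exact hrec
            · intro s hs
              rcases GFB_nf_elim hgf s hs with h' | ⟨st, hst, b, hb, hbt⟩
              · simp at h'
              · exact hbt ▸ ReachesN.step (hinv.1 st hst) hb
            · intro s hs
              obtain ⟨p, b, hp, hb, hsb⟩ := minR_succ_elim hs
              have hnv : s ∉ vis := by
                intro hmm
                obtain ⟨i, hi, hri⟩ := hinv.2.2 s hmm
                exact hs.2 i (by omega) hri
              exact hsb ▸ GFB_ins hgf p (hinv.2.1 p hp) b hb (hsb ▸ hnv)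
            · intro s hs
              rcases GFB_vis_elim hgf s hs with h' | h'
              · obtain ⟨i, hi, hri⟩ := hinv.2.2 s h'
                exact ⟨i, by omega, hri⟩
              · rcases GFB_nf_elim hgf s h' with h'' | ⟨st, hst, b, hb, hbt⟩
                · simp at h''
                · exact ⟨r + 1, le_refl _, hbt ▸ ReachesN.step (hinv.1 st hst) hb⟩
      · -- r + 1 = m: found this round
        have hpr : MinR bt z r p₀ := by
          have : m - 1 = r := by omega
          exact this ▸ hp₀
        obtain ⟨a, ha⟩ := GFB_finds (nf := ([] : List (List Bool))) (vis := vis)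
          (hinv.2.1 p₀ hpr) ⟨b₀, hb₀, ht₀.symm⟩
        rw [ha]
        obtain ⟨had, _⟩ := GFB_inl ha
        rw [had]
        push_cast
        omega

theorem portB_eq (bt : List (List Int)) (t : List Bool) (m : Nat)
    (hm : 0 < m) (hW : ReachesN bt (List.replicate t.length false) m t)
    (hmin : ∀ i, 0 < i → i < m → ¬ ReachesN bt (List.replicate t.length false) i t)
    (hfuel : m ≤ bt.length + 2) :
    find_buttons_pressed_alt bt t = (m : Int) := by
  unfold find_buttons_pressed_alt
  have h0 : ((0 : Nat) : Int) = (0 : Int) := rfl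
  refine h0 ▸ loopB_eq bt t m hm hW hmin (bt.length + 2) 0 _ _ ⟨?_, ?_, ?_⟩ hm (by omega)
  · intro s hs
    have h1 : s = List.replicate t.length false := by simpa using hs
    rw [h1]; exact ReachesN.zero
  · intro s hs
    have h1 : s = List.replicate t.length false := reach_zero_eq hs.1
    simp [h1]
  · intro s hs
    have h1 : s = List.replicate t.length false := by
      simpa using (PySem.Set.mem_ofList _ _).mp hs
    exact ⟨0, le_refl _, by rw [h1]; exact ReachesN.zero⟩

-- ===== VERDICT (by name: the statement is the Claim_ definition above) =====
theorem find_buttons_pressed_spec : Claim_equal_find_buttons_pressed := by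
  intro bt t _ hpre
  show find_buttons_pressed bt t = find_buttons_pressed_alt bt t
  -- from Pre_ obtain a short positive walk to the target
  have hex : ∃ d, 0 < d ∧ d ≤ bt.length + 2 ∧
      ReachesN bt (List.replicate t.length false) d t := by
    rcases hpre with ⟨hvalid, hne, hsp⟩ | ⟨j, hj, hvalid, htog⟩
    · exact span_reach hne hsp
    · refine ⟨1, by omega, by omega, ?_⟩
      have hjl : j < bt.length := by simpa using hj
      have hmem : bt.getD j [] ∈ bt := by
        rw [List.getD_eq_getElem _ _ hjl]
        exact List.getElem_mem hjl
      have hstep : ReachesN bt (List.replicate t.length false) 1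
          (pyToggle (List.replicate t.length false) (bt.getD j [])) :=
        ReachesN.step ReachesN.zero hmem
      rw [htog] at hstep
      exact hstep
  obtain ⟨d₀, hd₀, hdf, hW₀⟩ := hex
  -- take the least positive walk length m
  classical
  let P : Nat → Prop := fun d => 0 < d ∧ ReachesN bt (List.replicate t.length false) d t
  have hP : ∃ d, P d := ⟨d₀, hd₀, hW₀⟩
  let m := Nat.find hP
  have hspec : P m := Nat.find_spec hP
  have hmle : m ≤ d₀ := Nat.find_min' hP ⟨hd₀, hW₀⟩
  have hmin : ∀ i, 0 < i → i < m →
      ¬ ReachesN bt (List.replicate t.length false) i t := by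
    intro i hi hilt hri
    exact Nat.find_min hP hilt ⟨hi, hri⟩
  rw [portA_eq bt t m hspec.1 hspec.2 hmin (by omega),
      portB_eq bt t m hspec.1 hspec.2 hmin (by omega)]
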